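-- pv_equiv track=rewrite | github.com/MrBrantCode/unitest_baseline | mut_generate/mist_train_cf/cf_21467/solution.py | find_greatest_common_multiple
-- ===== SOURCE A (Python) =====
-- def find_greatest_common_multiple(nums):
--     """
--     This function calculates the greatest common multiple of two numbers in a list.
--
--     Args:
--         nums (list): A list of integers.
--
--     Returns:
--         int: The greatest common multiple of two numbers in the list.
--     """
--     max_gcm = 0
--     for i in range(len(nums)):
--         for j in range(i + 1, len(nums)):
--             num1, num2 = nums[i], nums[j]
--             gcm = min(num1, num2)
--             while gcm > 0:
--                 if num1 % gcm == 0 and num2 % gcm == 0: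
--                     max_gcm = max(max_gcm, gcm)
--                     break
--                 gcm -= 1
--     return max_gcm
-- ===== SOURCE B (Python) =====
-- def _gcd(a, b):
--     while b:
--         a, b = b, a % b
--     return a
--
-- def find_greatest_common_multiple(nums):
--     positives = [x for x in nums if x > 0]
--     best = 0
--     rest = positives
--     while rest:
--         x, rest = rest[0], rest[1:]
--         for y in rest:
--             g = _gcd(x, y)
--             if g > best:
--                 best = g
--     return best
-- ===== Notes on version B (the rewrite author's own statement) =====
-- stated objective: faster
-- what changed: B filters the strictly positive elements once and computes each pair's gcd with Euclid's algorithm, instead of A's per-pair downward linear search from min(a,b) for a common divisor.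
import Mathlib
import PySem

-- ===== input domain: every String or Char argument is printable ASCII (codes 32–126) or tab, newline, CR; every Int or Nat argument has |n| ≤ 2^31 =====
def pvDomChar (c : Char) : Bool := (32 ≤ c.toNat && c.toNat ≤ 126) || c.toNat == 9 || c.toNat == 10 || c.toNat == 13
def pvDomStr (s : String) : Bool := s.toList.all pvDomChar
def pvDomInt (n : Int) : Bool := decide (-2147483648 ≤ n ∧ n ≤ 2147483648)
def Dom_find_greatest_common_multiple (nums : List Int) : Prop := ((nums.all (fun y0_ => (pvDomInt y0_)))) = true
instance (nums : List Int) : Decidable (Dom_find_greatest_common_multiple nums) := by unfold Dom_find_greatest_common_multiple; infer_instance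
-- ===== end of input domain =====

-- B replaces A's per-pair decrement search for a common divisor by Euclid's algorithm over
-- the positive elements only (objective: faster inner loop mechanism).

-- ===== PORT A =====
-- the inner `while gcm > 0` loop of A: count gcm down until it divides both numbers
def pvAWhile (num1 num2 gcm maxg : Int) : Int :=
  if 0 < gcm then
    if PySem.Int.mod num1 gcm == 0 && PySem.Int.mod num2 gcm == 0 then max maxg gcm
    else pvAWhile num1 num2 (gcm - 1) maxg
  else maxg
termination_by gcm.toNat
decreasing_by omega

def find_greatest_common_multiple (nums : List Int) : Int :=
  (List.range nums.length).foldl (fun maxg i =>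
    (List.range' (i + 1) (nums.length - (i + 1))).foldl (fun mg j =>
      let num1 := nums.getD i 0
      let num2 := nums.getD j 0
      pvAWhile num1 num2 (min num1 num2) mg) maxg) 0

-- ===== PORT B =====
-- hand-written Euclid (Source B's `_gcd`); `%` is Python's mod
def pvGcd (a b : Int) : Int :=
  if h : b ≠ 0 then pvGcd b (PySem.Int.mod a b) else a
termination_by b.natAbs
decreasing_by
  rcases lt_or_gt_of_ne h with hb | hb
  · have h1 := (PySem.Int.mod_neg_bounds a hb).1
    have h2 := (PySem.Int.mod_neg_bounds a hb).2
    omega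
  · have h1 := PySem.Int.mod_nonneg a hb
    have h2 := PySem.Int.mod_lt a hb
    omega

-- inner `for y in rest` loop of Source B
def pvBestWith (x : Int) (ys : List Int) (best : Int) : Int :=
  ys.foldl (fun b y => if pvGcd x y > b then pvGcd x y else b) best

-- outer `while rest` loop of Source B
def pvGo : List Int → Int → Int
  | [], best => best
  | x :: rest, best => pvGo rest (pvBestWith x rest best)

def find_greatest_common_multiple_alt (nums : List Int) : Int :=
  pvGo (nums.filter (fun x => 0 < x)) 0

-- ===== PRECONDITION & SPEC =====
def Spec_find_greatest_common_multiple (nums : List Int) (out : Int) : Prop := out = find_greatest_common_multiple_alt nums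
instance (nums : List Int) (out : Int) : Decidable (Spec_find_greatest_common_multiple nums out) := by unfold Spec_find_greatest_common_multiple; infer_instance

-- ===== CLAIM (what is proved, stated in full; the proofs are below) =====
def Claim_equal_find_greatest_common_multiple : Prop := ∀ (nums : List Int), Dom_find_greatest_common_multiple nums → Spec_find_greatest_common_multiple nums (find_greatest_common_multiple nums)

-- ===== LEMMAS AND PROOFS =====

-- A's per-pair step, named for the proofs
def stepA (x y m : Int) : Int := pvAWhile x y (min x y) m

-- A's double index loop reshaped as structural recursion (proved equal in goA_eq_A below)
def goA : List Int → Int → Int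
  | [], m => m
  | x :: ys, m => goA ys (ys.foldl (fun m y => stepA x y m) m)

lemma foldl_congr' {α β : Type} {f g : β → α → β} (l : List α) (b : β)
    (h : ∀ c a, a ∈ l → f c a = g c a) : l.foldl f b = l.foldl g b := by
  induction l generalizing b with
  | nil => rfl
  | cons x xs ih =>
    simp only [List.foldl_cons, h b x (by simp)]
    exact ih _ (fun c a ha => h c a (by simp [ha]))

lemma foldl_id {α β : Type} (f : β → α → β) (l : List α) (b : β)
    (h : ∀ c a, a ∈ l → f c a = c) : l.foldl f b = b := by
  induction l generalizing b with
  | nil => rfl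
  | cons x xs ih =>
    simp only [List.foldl_cons, h b x (by simp)]
    exact ih b (fun c a ha => h c a (by simp [ha]))

lemma foldl_index (l : List Int) (f : Int → Int → Int) (m : Int) :
    (List.range l.length).foldl (fun b i => f b (l.getD i 0)) m = l.foldl f m := by
  induction l generalizing m with
  | nil => rfl
  | cons x xs ih =>
    simp only [List.length_cons, List.range_succ_eq_map, List.foldl_cons, List.foldl_map]
    simpa using ih (f m x)

lemma goA_eq_A (xs : List Int) (m : Int) :
    (List.range xs.length).foldl (fun maxg i =>
      (List.range' (i + 1) (xs.length - (i + 1))).foldl (fun mg j =>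
        stepA (xs.getD i 0) (xs.getD j 0) mg) maxg) m = goA xs m := by
  induction xs generalizing m with
  | nil => rfl
  | cons x ys ih =>
    simp only [List.length_cons, List.range_succ_eq_map, List.foldl_cons, List.foldl_map, goA]
    have inner0 : (List.range' (0 + 1) (ys.length + 1 - (0 + 1))).foldl
        (fun mg j => stepA ((x :: ys).getD 0 0) ((x :: ys).getD j 0) mg) m
        = ys.foldl (fun m y => stepA x y m) m := by
      rw [List.range'_eq_map_range, List.foldl_map,
        ← foldl_index ys (fun b y => stepA x y b) m]
      apply foldl_congr'
      intro c i _
      simp [Nat.add_comm 1 i]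
    rw [inner0, ← ih (ys.foldl (fun m y => stepA x y m) m)]
    apply foldl_congr'
    intro c i _
    have hlen : ys.length + 1 - (Nat.succ i + 1) = ys.length - (i + 1) := by omega
    rw [hlen, List.range'_eq_map_range, List.foldl_map, List.range'_eq_map_range, List.foldl_map]
    apply foldl_congr'
    intro d j _
    have e2 : Nat.succ i + 1 + j = (i + 1 + j) + 1 := by omega
    rw [e2]
    simp

lemma stepA_nonpos {x y m : Int} (h : min x y ≤ 0) : stepA x y m = m := by
  unfold stepA
  rw [pvAWhile, if_neg (by omega)]

lemma awhile_run (x y : Int) (hx : 0 < x) (hy : 0 < y) :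
    ∀ (n : Nat) (g m : Int), g.toNat = n → (Int.gcd x y : Int) ≤ g → g ≤ min x y →
      pvAWhile x y g m = max m (Int.gcd x y) := by
  have hg : (0 : Int) < Int.gcd x y := by
    have hx0 : x ≠ 0 := by omega
    exact_mod_cast Int.gcd_pos_iff.mpr (Or.inl hx0)
  intro n
  induction n with
  | zero => intro g m hgn h1 h2; omega
  | succ n ih =>
    intro g m hgn h1 h2
    have hgpos : 0 < g := by omega
    have hcond : ((PySem.Int.mod x g == 0) && (PySem.Int.mod y g == 0)) = true
        ↔ (g ∣ x ∧ g ∣ y) := by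
      simp [PySem.Int.mod_eq_zero_iff_dvd]
    rw [pvAWhile, if_pos hgpos]
    by_cases hc : g ∣ x ∧ g ∣ y
    · rw [if_pos (hcond.mpr hc)]
      have hdg : g ∣ (Int.gcd x y : Int) := by
        have hn : g.natAbs ∣ Nat.gcd x.natAbs y.natAbs :=
          Nat.dvd_gcd (Int.natAbs_dvd_natAbs.mpr hc.1) (Int.natAbs_dvd_natAbs.mpr hc.2)
        exact Int.natAbs_dvd.mp (Int.natCast_dvd_natCast.mpr hn)
      have hle : g ≤ (Int.gcd x y : Int) := Int.le_of_dvd hg hdg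
      have heq : g = (Int.gcd x y : Int) := le_antisymm hle h1
      rw [heq]
    · rw [if_neg (fun h => hc (hcond.mp h))]
      have hne : (Int.gcd x y : Int) ≠ g := by
        intro e
        exact hc ⟨e ▸ Int.gcd_dvd_left x y, e ▸ Int.gcd_dvd_right x y⟩
      exact ih (g - 1) m (by omega) (by omega) (by omega)

lemma stepA_pos {x y m : Int} (hx : 0 < x) (hy : 0 < y) :
    stepA x y m = max m (Int.gcd x y) := by
  have hg : (0 : Int) < Int.gcd x y := by
    have hx0 : x ≠ 0 := by omega
    exact_mod_cast Int.gcd_pos_iff.mpr (Or.inl hx0)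
  have h1 : (Int.gcd x y : Int) ≤ x := Int.le_of_dvd hx (Int.gcd_dvd_left x y)
  have h2 : (Int.gcd x y : Int) ≤ y := Int.le_of_dvd hy (Int.gcd_dvd_right x y)
  exact awhile_run x y hx hy (min x y).toNat (min x y) m rfl (by omega) le_rfl

lemma pvGcd_natCast : ∀ (B A : Nat), pvGcd (A : Int) (B : Int) = (Nat.gcd A B : Int) := by
  intro B
  induction B using Nat.strong_induction_on with
  | _ B ih =>
    intro A
    by_cases hB : B = 0
    · subst hB
      rw [pvGcd]
      simp
    · have hB' : ((B : Int)) ≠ 0 := by exact_mod_cast hB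
      rw [pvGcd, dif_pos hB', PySem.Int.mod_natCast]
      rw [ih (A % B) (Nat.mod_lt _ (Nat.pos_of_ne_zero hB)) B]
      rw [Nat.gcd_comm B (A % B), ← Nat.gcd_rec B A]
      exact congrArg _ (Nat.gcd_comm B A)

lemma pvGcd_eq_gcd {x y : Int} (hx : 0 ≤ x) (hy : 0 ≤ y) :
    pvGcd x y = (Int.gcd x y : Int) := by
  rw [← Int.toNat_of_nonneg hx, ← Int.toNat_of_nonneg hy, pvGcd_natCast]
  simp only [Int.gcd, Int.natAbs_natCast]

lemma stepB_pos {x y b : Int} (hx : 0 < x) (hy : 0 < y) :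
    (if pvGcd x y > b then pvGcd x y else b) = max b (Int.gcd x y) := by
  rw [pvGcd_eq_gcd (le_of_lt hx) (le_of_lt hy)]
  by_cases h : (Int.gcd x y : Int) > b
  · rw [if_pos h, max_eq_right (by omega)]
  · rw [if_neg h, max_eq_left (by omega)]

lemma foldl_stepA_filter (x : Int) (hx : 0 < x) :
    ∀ (ys : List Int) (m : Int), ys.foldl (fun m y => stepA x y m) m
      = pvBestWith x (ys.filter (fun x => 0 < x)) m := by
  intro ys
  induction ys with
  | nil => intro m; rfl
  | cons y zs ih =>
    intro m
    by_cases hy : 0 < y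
    · simp only [List.foldl_cons, List.filter_cons, hy, decide_true, if_pos, pvBestWith]
      rw [stepA_pos hx hy, stepB_pos hx hy]
      simpa [pvBestWith] using ih (max m (Int.gcd x y))
    · simp only [List.foldl_cons, List.filter_cons, hy, decide_false, if_neg, Bool.false_eq_true,
        not_false_eq_true]
      rw [stepA_nonpos (by omega)]
      exact ih m

lemma goA_eq_goB : ∀ (xs : List Int) (m : Int),
    goA xs m = pvGo (xs.filter (fun x => 0 < x)) m := by
  intro xs
  induction xs with
  | nil => intro m; rfl
  | cons x ys ih =>
    intro m
    by_cases hx : 0 < x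
    · simp only [goA, List.filter_cons, hx, decide_true, if_pos, pvGo]
      rw [foldl_stepA_filter x hx ys m, ih]
    · simp only [goA, List.filter_cons, hx, decide_false, if_neg, Bool.false_eq_true,
        not_false_eq_true]
      rw [foldl_id _ _ _ (fun c a _ => stepA_nonpos (by omega)), ih]

-- ===== VERDICT (by name: the statement is the Claim_ definition above) =====
theorem find_greatest_common_multiple_spec : Claim_equal_find_greatest_common_multiple := by
  intro nums _
  unfold Spec_find_greatest_common_multiple find_greatest_common_multiple
    find_greatest_common_multiple_alt
  rw [show (fun (maxg : Int) (i : Nat) =>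
      (List.range' (i + 1) (nums.length - (i + 1))).foldl (fun mg j =>
        let num1 := nums.getD i 0
        let num2 := nums.getD j 0
        pvAWhile num1 num2 (min num1 num2) mg) maxg)
    = (fun (maxg : Int) (i : Nat) =>
      (List.range' (i + 1) (nums.length - (i + 1))).foldl (fun mg j =>
        stepA (nums.getD i 0) (nums.getD j 0) mg) maxg) from rfl]
  rw [goA_eq_A, goA_eq_goB]
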